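-- pv_equiv track=rewrite | github.com/maplebullet/campus-network | login.py | l
-- ===== SOURCE A (Python) =====
-- def _get_str(c):
--     return chr(c) if isinstance(c, int) else c
--
-- def l(a, b):
--     d = len(a)
--     c = (d - 1) << 2
--     if b:
--         m = a[d - 1]
--         if m < c - 3 or m > c:
--             return None
--         c = m
--
--     s = []
--     for i in range(d):
--         s.append(_get_str(a[i] & 0xff))
--         s.append(_get_str(a[i] >> 8 & 0xff))
--         s.append(_get_str(a[i] >> 16 & 0xff))
--         s.append(_get_str(a[i] >> 24 & 0xff))
--
--     res = "".join(s)
--     return res[0:c] if b else res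
-- ===== SOURCE B (Python) =====
-- def l(a, b):
--     d = len(a)
--     c = (d - 1) << 2
--     if b:
--         m = a[d - 1]
--         if m < c - 3 or m > c:
--             return None
--         c = m
--
--     # number of characters actually requested (Python slice semantics for a
--     # possibly-negative c), then generate exactly those characters by index:
--     # character i is byte i & 3 of word i >> 2.
--     n = c if b else 4 * d
--     if n < 0:
--         n += 4 * d
--     return "".join(chr(a[i >> 2] >> (8 * (i & 3)) & 0xff) for i in range(n))
-- ===== Notes on version B (the rewrite author's own statement) =====
-- stated objective: alternative
-- what changed: Instead of expanding every word into four chr() strings, joining them all and slicing afterwards, B first computes the final character count n (resolving the possibly-negative slice bound arithmetically) and then builds the result in one loop over output positions i in range(n), fetching byte i&3 of word i>>2 directly, so no intermediate full string is built and a truncated request never decodes the unused words.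
import Mathlib
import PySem

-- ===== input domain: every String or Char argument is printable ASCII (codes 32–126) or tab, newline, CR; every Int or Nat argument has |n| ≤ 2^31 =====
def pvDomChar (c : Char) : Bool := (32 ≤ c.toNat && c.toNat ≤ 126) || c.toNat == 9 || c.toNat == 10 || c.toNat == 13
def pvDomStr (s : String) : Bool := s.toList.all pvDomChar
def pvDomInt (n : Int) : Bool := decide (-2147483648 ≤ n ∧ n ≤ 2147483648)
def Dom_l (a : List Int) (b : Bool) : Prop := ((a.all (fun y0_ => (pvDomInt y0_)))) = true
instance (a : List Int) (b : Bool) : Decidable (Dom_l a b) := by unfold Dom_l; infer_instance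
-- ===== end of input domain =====

-- B replaces A's expand-all-words/join/slice pipeline by computing the output length first and
-- generating exactly the requested characters by output index (objective: alternative decomposition, same cost class).


-- ===== PORT A =====
-- _get_str(c) for an int argument is chr(c); the four extracted byte values are ints in 0..255.
def pyChr4 (x : Int) : List String :=
  [String.ofList [Char.ofNat (PySem.Int.band x 255).toNat],
   String.ofList [Char.ofNat (PySem.Int.band (x >>> (8 : Nat)) 255).toNat],
   String.ofList [Char.ofNat (PySem.Int.band (x >>> (16 : Nat)) 255).toNat],
   String.ofList [Char.ofNat (PySem.Int.band (x >>> (24 : Nat)) 255).toNat]]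

def l (a : List Int) (b : Bool) : Option String :=
  let d : Int := (a.length : Int)
  let c : Int := (d - 1) <<< (2 : Nat)
  -- the 'if b' block: a[d-1] (pyGet? = none is the IndexError on [], excluded by Pre_l),
  -- the out-of-range check returning None, then c = m
  let step : Option Int :=
    if b then
      match PySem.List.pyGet? a (d - 1) with
      | none => none
      | some m => if m < c - 3 ∨ m > c then none else some m
    else some c
  match step with
  | none => none
  | some c =>
    let s : List String :=
      (PySem.List.pyRange 0 d 1).foldl (fun s i => s ++ pyChr4 (PySem.List.pyGetD a i 0)) []
    let res : String := PySem.Str.join "" s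
    if b then some (PySem.Str.slice res (some 0) (some c)) else some res

-- ===== PORT B =====
-- chr(a[i >> 2] >> (8 * (i & 3)) & 0xff), the character at output position i
def bChr (a : List Int) (i : Int) : String :=
  String.ofList [Char.ofNat
    (PySem.Int.band ((PySem.List.pyGetD a (i >>> (2 : Nat)) 0) >>> (8 * (PySem.Int.band i 3)).toNat) 255).toNat]

def l_alt (a : List Int) (b : Bool) : Option String :=
  let d : Int := (a.length : Int)
  let c : Int := (d - 1) <<< (2 : Nat)
  let step : Option Int :=
    if b then
      match PySem.List.pyGet? a (d - 1) with
      | none => none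
      | some m => if m < c - 3 ∨ m > c then none else some m
    else some c
  match step with
  | none => none
  | some c =>
    let n0 : Int := if b then c else 4 * d
    let n : Int := if n0 < 0 then n0 + 4 * d else n0
    some (PySem.Str.join "" ((PySem.List.pyRange 0 n 1).map (bChr a)))

-- ===== PRECONDITION & SPEC =====
-- Pre_l excludes only the case of an empty list with truncation requested, where both A and B raise IndexError at a[d-1].
def Pre_l (a : List Int) (b : Bool) : Prop := b = true → a ≠ []
instance (a : List Int) (b : Bool) : Decidable (Pre_l a b) := by unfold Pre_l; infer_instance
def pvWitness_l : List Int × Bool := ([72, 3], true)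

def Spec_l (a : List Int) (b : Bool) (out : Option String) : Prop := out = l_alt a b
instance (a : List Int) (b : Bool) (out : Option String) : Decidable (Spec_l a b out) := by unfold Spec_l; infer_instance

-- ===== CLAIM (what is proved, stated in full; the proofs are below) =====
def Claim_equal_l : Prop := ∀ (a : List Int) (b : Bool), Dom_l a b → Pre_l a b → Spec_l a b (l a b)

-- ===== LEMMAS AND PROOFS =====

-- the four byte codes A extracts from one word
def codes4 (x : Int) : List Nat :=
  [(PySem.Int.band x 255).toNat,
   (PySem.Int.band (x >>> (8 : Nat)) 255).toNat,
   (PySem.Int.band (x >>> (16 : Nat)) 255).toNat,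
   (PySem.Int.band (x >>> (24 : Nat)) 255).toNat]

def byteOf (x : Int) (k : Nat) : Nat := (PySem.Int.band (x >>> (8 * k)) 255).toNat

lemma codes4_eq (x : Int) : codes4 x = [byteOf x 0, byteOf x 1, byteOf x 2, byteOf x 3] := by
  unfold codes4 byteOf
  norm_num [Int.shiftRight_eq_div_pow]

lemma len_fm (a : List Int) : (a.flatMap codes4).length = 4 * a.length := by
  induction a with
  | nil => rfl
  | cons x xs ih => simp [List.flatMap_cons, codes4, ih]; omega

lemma chr4_eq (x : Int) :
    pyChr4 x = (codes4 x).map (fun n => String.ofList [Char.ofNat n]) := rfl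

-- "".join over singleton chr strings is decoding of the code list
lemma join_map_singletons (cs : List Nat) :
    PySem.Str.join "" (cs.map (fun n => String.ofList [Char.ofNat n]))
      = String.ofList (cs.map Char.ofNat) := by
  apply String.ext
  show (PySem.Str.join "" _).toList = _
  rw [PySem.Str.toList_join]
  have h : (cs.map (fun n => String.ofList [Char.ofNat n])).map String.toList
      = (cs.map Char.ofNat).map (fun c => [c]) := by
    simp [List.map_map, Function.comp]
  rw [show ("" : String).toList = [] from rfl, h, PySem.Chars.join_nil_singletons]
  simp

-- element j of the flattened code list is byte j % 4 of word j / 4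
lemma fm_get? (a : List Int) (j : Nat) (h : j < 4 * a.length) :
    (a.flatMap codes4)[j]? = some (byteOf (a.getD (j / 4) 0) (j % 4)) := by
  induction a generalizing j with
  | nil => simp at h
  | cons x xs ih =>
    rw [List.flatMap_cons]
    have hlen : (codes4 x).length = 4 := rfl
    by_cases hj : j < 4
    · rw [List.getElem?_append_left (by omega)]
      have hd : j / 4 = 0 := by omega
      have hm : j % 4 = j := by omega
      rw [hd, hm, List.getD_cons_zero]
      interval_cases j <;> simp [codes4_eq]
    · rw [List.getElem?_append_right (by omega)]
      have h' : j - (codes4 x).length < 4 * xs.length := by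
        simp only [List.length_cons] at h; omega
      rw [ih (j - (codes4 x).length) h']
      have h1 : (j - (codes4 x).length) / 4 = j / 4 - 1 := by omega
      have h2 : (j - (codes4 x).length) % 4 = j % 4 := by omega
      rw [h1, h2]
      have hd : j / 4 = (j / 4 - 1) + 1 := by omega
      rw [hd, List.getD_cons_succ]
      norm_num

-- B's character code at output position j is A's byte j % 4 of word j / 4
lemma code_eq (a : List Int) (j : Nat) (h : j < 4 * a.length) :
    (PySem.Int.band ((PySem.List.pyGetD a ((j : Int) >>> (2 : Nat)) 0)
        >>> (8 * (PySem.Int.band (j : Int) 3)).toNat) 255).toNat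
      = byteOf (a.getD (j / 4) 0) (j % 4) := by
  have hband : PySem.Int.band (j : Int) 3 = ((j % 4 : Nat) : Int) := by
    rw [show ((3 : Int)) = ((3 : Nat) : Int) from rfl, PySem.Int.band_natCast]
    congr 1
    have := Nat.and_two_pow_sub_one_eq_mod j 2
    norm_num at this
    exact this
  have hsh : ((j : Int) >>> (2 : Nat)) = ((j / 4 : Nat) : Int) := by
    rw [Int.shiftRight_eq_div_pow]
    norm_num [Int.natCast_div]
  have htn : ((8 : Int) * ((j % 4 : Nat) : Int)).toNat = 8 * (j % 4) := by omega
  rw [hband, hsh, htn, PySem.List.pyGetD_natCast]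
  rfl

-- the first n characters of A's decoded list are B's n generated characters
lemma take_eq (a : List Int) (n : Nat) (h : n ≤ 4 * a.length) :
    ((a.flatMap codes4).map Char.ofNat).take n
      = (PySem.List.pyRange 0 (n : Int) 1).map (fun (i : Int) =>
          Char.ofNat (PySem.Int.band ((PySem.List.pyGetD a (i >>> (2 : Nat)) 0)
            >>> (8 * (PySem.Int.band i 3)).toNat) 255).toNat) := by
  apply List.ext_getElem
  · simp only [List.length_take, List.length_map, len_fm, PySem.List.length_pyRange_one]
    omega
  · intro j h1 h2
    have hj : j < 4 * a.length := by
      simp only [List.length_take, List.length_map, len_fm] at h1; omega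
    rw [List.getElem_take, List.getElem_map, List.getElem_map, PySem.List.getElem_pyRange_one]
    simp only [zero_add]
    rw [code_eq a j hj]
    have := fm_get? a j hj
    rw [List.getElem?_eq_getElem (by rw [len_fm]; exact hj)] at this
    exact congrArg Char.ofNat (Option.some.inj this)

-- A's joined string is the decoding of the flattened code list
lemma res_eq (a : List Int) :
    PySem.Str.join ""
      ((PySem.List.pyRange 0 (a.length : Int) 1).foldl
        (fun s i => s ++ pyChr4 (PySem.List.pyGetD a i 0)) [])
    = String.ofList ((a.flatMap codes4).map Char.ofNat) := by
  rw [PySem.List.foldl_pyRange_zero_pyGetD' a 0 (fun s x => s ++ pyChr4 x) []]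
  rw [PySem.List.foldl_append_eq_flatMap]
  simp only [List.nil_append]
  have h : List.flatMap pyChr4 a
      = (List.flatMap codes4 a).map (fun n => String.ofList [Char.ofNat n]) := by
    rw [List.map_flatMap]
    exact List.flatMap_congr (fun x _ => chr4_eq x)
  rw [h, join_map_singletons]

-- B's joined string, for 0 ≤ n ≤ 4*len, is the first n characters of A's string
lemma alt_join_eq (a : List Int) (n : Int) (h0 : 0 ≤ n) (h1 : n ≤ 4 * (a.length : Int)) :
    PySem.Str.join "" ((PySem.List.pyRange 0 n 1).map (bChr a))
      = String.ofList (((a.flatMap codes4).map Char.ofNat).take n.toNat) := by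
  unfold bChr
  rw [take_eq a n.toNat (by omega), Int.toNat_of_nonneg h0]
  rw [show (PySem.List.pyRange 0 n 1).map (fun (i : Int) =>
      String.ofList [Char.ofNat (PySem.Int.band ((PySem.List.pyGetD a (i >>> (2 : Nat)) 0)
        >>> (8 * (PySem.Int.band i 3)).toNat) 255).toNat])
    = ((PySem.List.pyRange 0 n 1).map (fun (i : Int) =>
        Char.ofNat (PySem.Int.band ((PySem.List.pyGetD a (i >>> (2 : Nat)) 0)
          >>> (8 * (PySem.Int.band i 3)).toNat) 255).toNat)).map
        (fun c => String.ofList [c]) from by rw [List.map_map]; rfl]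
  generalize (PySem.List.pyRange 0 n 1).map _ = cs
  apply String.ext
  show (PySem.Str.join "" _).toList = _
  rw [PySem.Str.toList_join]
  have h : (cs.map (fun c => String.ofList [c])).map String.toList
      = cs.map (fun c => [c]) := by simp [List.map_map, Function.comp]
  rw [show ("" : String).toList = [] from rfl, h, PySem.Chars.join_nil_singletons]
  simp

-- ===== VERDICT (by name: the statement is the Claim_ definition above) =====
theorem l_spec : Claim_equal_l := by
  intro a b hdom hpre
  unfold Spec_l l l_alt
  cases b with
  | false =>
    simp only [Bool.false_eq_true, if_false, reduceIte]
    rw [if_neg (show ¬(4 * (a.length : Int) < 0) by omega)]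
    rw [res_eq, alt_join_eq a (4 * (a.length : Int)) (by positivity) le_rfl]
    congr 1
    rw [show (4 * (a.length : Int)).toNat = 4 * a.length by omega,
        List.take_of_length_le (by simp only [List.length_map, len_fm]; exact le_rfl)]
  | true =>
    have hne : a ≠ [] := hpre rfl
    have hlen : 1 ≤ a.length := by
      cases a with
      | nil => exact absurd rfl hne
      | cons h t => simp
    simp only [if_true]
    rcases hgx : PySem.List.pyGet? a ((a.length : Int) - 1) with _ | m
    · rw [PySem.List.pyGet?_eq_some_getElem a (by omega) (by push_cast; omega)] at hgx
    · simp only [hgx]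
      have hshl : ((a.length : Int) - 1) <<< (2 : Nat) = 4 * ((a.length : Int) - 1) := by
        rw [Int.shiftLeft_eq]; ring
      by_cases hrange : m < ((a.length : Int) - 1) <<< (2 : Nat) - 3 ∨ m > ((a.length : Int) - 1) <<< (2 : Nat)
      · rw [if_pos hrange]
      · rw [if_neg hrange]
        push_neg at hrange
        obtain ⟨hm1, hm2⟩ := hrange
        rw [hshl] at hm1 hm2
        simp only []
        congr 1
        rw [res_eq]
        by_cases hneg : m < 0
        · -- negative slice bound: only possible when the list has exactly one element
          rw [if_pos hneg]
          have hd1 : a.length = 1 := by omega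
          set k : Nat := (-m).toNat with hk
          have hk1 : 1 ≤ k := by omega
          have hk3 : k ≤ 3 := by omega
          have hmk : m = -(k : Int) := by omega
          apply String.ext
          rw [PySem.Str.toList_slice, PySem.Chars.slice_eq_listSlice]
          simp only [String.toList_ofList]
          rw [PySem.List.slice_zero_start, hmk, PySem.List.slice_to_neg_natCast _ k (by omega)]
          rw [alt_join_eq a (-(k : Int) + 4 * (a.length : Int)) (by push_cast [hd1]; omega)
            (by omega)]
          simp only [String.toList_ofList]
          congr 1
          simp only [List.length_map, len_fm, hd1]
          omega
        · rw [if_neg hneg]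
          push_neg at hneg
          apply String.ext
          rw [PySem.Str.toList_slice, PySem.Chars.slice_eq_listSlice]
          simp only [String.toList_ofList]
          rw [PySem.List.slice_zero_start, PySem.List.slice_to _ hneg]
          rw [alt_join_eq a m hneg (by push_cast; omega)]
          simp only [String.toList_ofList]
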